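-- pv_equiv track=rewrite | github.com/alexander-goeggelmann/PythonScripts | Read_Simulation/Columns.py | column_name_append
-- ===== SOURCE A (Python) =====
-- def column_name(column, list1, list2):
--     """ Checks, if (the string) column is in list1 or list2.
--
--     Args:
--         column (string): A string.
--         list1 (list like): List of strings.
--         list2 (list like): List of strings.
--
--     Returns:
--         boolean: True, if column is in the lists.
--     """
--
--     if column in list1:
--         return True
--     if column in list2:
--         return True
--     return False
--
-- def column_name_append(column, list1, list2, appendix):
--     """ Checks, if (the string) column, or column + appendix, is in list1 or list2.
--
--     Args:
--         column (string): A string.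
--         list1 (list like): List of strings.
--         list2 (list like): List of strings.
--         appendix (string): A string.
--
--     Returns:
--         boolean: True, if column is in the lists.
--     """
--
--     for c in list1:
--         if column == (c + appendix):
--             return True
--     for c in list2:
--         if column == (c + appendix):
--             return True
--     return column_name(column, list1, list2)
-- ===== SOURCE B (Python) =====
-- def column_name_append(column, list1, list2, appendix):
--     if column.endswith(appendix):
--         prefix = column[:len(column) - len(appendix)]
--         if prefix in list1 or prefix in list2:
--             return True
--     return column in list1 or column in list2
-- ===== Notes on version B (the rewrite author's own statement) =====
-- stated objective: faster
-- what changed: Instead of scanning both lists building a c+appendix concatenation for every element, B tests column.endswith(appendix) once, derives the single stripped prefix, and uses plain membership tests.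
import Mathlib
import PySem

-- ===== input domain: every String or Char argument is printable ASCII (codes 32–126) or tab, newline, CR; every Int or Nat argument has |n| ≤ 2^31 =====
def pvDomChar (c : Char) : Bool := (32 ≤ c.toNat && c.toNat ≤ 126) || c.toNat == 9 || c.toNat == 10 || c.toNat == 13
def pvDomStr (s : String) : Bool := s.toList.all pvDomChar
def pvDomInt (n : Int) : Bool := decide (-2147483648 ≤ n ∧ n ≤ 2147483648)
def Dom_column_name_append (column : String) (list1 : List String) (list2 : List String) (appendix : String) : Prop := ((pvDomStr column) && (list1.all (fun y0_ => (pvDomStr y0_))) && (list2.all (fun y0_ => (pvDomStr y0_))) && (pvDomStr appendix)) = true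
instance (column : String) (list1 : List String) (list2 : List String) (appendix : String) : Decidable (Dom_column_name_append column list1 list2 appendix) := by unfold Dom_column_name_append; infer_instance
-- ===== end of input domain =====

-- B replaces A's two concatenation-building scans by one endswith test plus
-- membership tests on the single stripped prefix; objective: simpler.

-- ===== PORT A =====
-- helper column_name: 'if column in list1: return True; if column in list2: return True; return False'
def column_name (column : String) (list1 : List String) (list2 : List String) : Bool :=
  if list1.contains column then true
  else if list2.contains column then true
  else false

-- two early-return for-loops comparing column with c + appendix (string concat = list append on code points), then column_name
def column_name_append (column : String) (list1 : List String) (list2 : List String) (appendix : String) : Bool :=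
  if list1.any (fun c => column.toList == c.toList ++ appendix.toList) then true
  else if list2.any (fun c => column.toList == c.toList ++ appendix.toList) then true
  else column_name column list1 list2

-- ===== PORT B =====
def column_name_append_alt (column : String) (list1 : List String) (list2 : List String) (appendix : String) : Bool :=
  let cl := column.toList
  let al := appendix.toList
  if PySem.Chars.endswith cl al then
    -- prefix = column[:len(column) - len(appendix)]
    let pre := PySem.Chars.slice cl none (some ((cl.length : Int) - (al.length : Int)))
    if list1.any (fun c => c.toList == pre) || list2.any (fun c => c.toList == pre) then true
    else list1.contains column || list2.contains column
  else list1.contains column || list2.contains column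

-- ===== PRECONDITION & SPEC =====
def Spec_column_name_append (column : String) (list1 : List String) (list2 : List String) (appendix : String) (out : Bool) : Prop := out = column_name_append_alt column list1 list2 appendix
instance (column : String) (list1 : List String) (list2 : List String) (appendix : String) (out : Bool) : Decidable (Spec_column_name_append column list1 list2 appendix out) := by unfold Spec_column_name_append; infer_instance

-- ===== CLAIM (what is proved, stated in full; the proofs are below) =====
def Claim_equal_column_name_append : Prop := ∀ (column : String) (list1 : List String) (list2 : List String) (appendix : String), Dom_column_name_append column list1 list2 appendix → Spec_column_name_append column list1 list2 appendix (column_name_append column list1 list2 appendix)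

-- ===== LEMMAS AND PROOFS =====

-- When appendix is a suffix of column, 'column = c ++ appendix' is exactly 'c = stripped prefix'.
theorem pv_eq_append_iff (cl al x : List Char) (h : al <:+ cl) :
    (cl = x ++ al) ↔ x = cl.take (cl.length - al.length) := by
  constructor
  · rintro rfl
    simp
  · rintro rfl
    obtain ⟨t, rfl⟩ := h
    simp

-- When appendix is NOT a suffix, no 'c ++ appendix' can equal column.
theorem pv_ne_append (cl al x : List Char) (h : ¬ al <:+ cl) : cl ≠ x ++ al := by
  rintro rfl
  exact h (List.suffix_append x al)

-- Boolean shape of the two programs once the per-element tests are identified.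
theorem pv_chain (a b c d : Bool) :
    (if a then true else if b then true else (if c then true else if d then true else false))
      = (if a || b then true else c || d) := by
  cases a <;> cases b <;> cases c <;> cases d <;> rfl

theorem pv_chain₂ (c d : Bool) :
    (if c then true else if d then true else false) = (c || d) := by
  cases c <;> cases d <;> rfl

theorem column_name_append_spec : Claim_equal_column_name_append := by
  intro column list1 list2 appendix _
  unfold Spec_column_name_append column_name_append column_name_append_alt column_name
  by_cases hs : appendix.toList <:+ column.toList
  · have he : PySem.Chars.endswith column.toList appendix.toList = true :=
      (PySem.Chars.endswith_iff _ _).mpr hs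
    have hle : appendix.toList.length ≤ column.toList.length := hs.length_le
    have hpre : PySem.Chars.slice column.toList none
        (some ((column.toList.length : Int) - (appendix.toList.length : Int)))
        = column.toList.take (column.toList.length - appendix.toList.length) := by
      rw [PySem.Chars.slice_eq_listSlice,
          PySem.List.slice_to column.toList (b := (column.toList.length : Int) - (appendix.toList.length : Int)) (by omega)]
      congr 1
      omega
    have harg : ∀ c : String,
        (column.toList == c.toList ++ appendix.toList)
          = (c.toList == column.toList.take (column.toList.length - appendix.toList.length)) := by
      intro c
      exact Bool.eq_iff_iff.mpr
        (by simpa using pv_eq_append_iff column.toList appendix.toList c.toList hs)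
    simp only [he, if_true, hpre, harg]
    exact pv_chain _ _ _ _
  · have he : PySem.Chars.endswith column.toList appendix.toList = false := by
      cases h : PySem.Chars.endswith column.toList appendix.toList
      · rfl
      · exact absurd ((PySem.Chars.endswith_iff _ _).mp h) hs
    have h1 : list1.any (fun c => column.toList == c.toList ++ appendix.toList) = false := by
      simp only [List.any_eq_false]
      intro c _
      simpa using pv_ne_append _ _ c.toList hs
    have h2 : list2.any (fun c => column.toList == c.toList ++ appendix.toList) = false := by
      simp only [List.any_eq_false]
      intro c _
      simpa using pv_ne_append _ _ c.toList hs
    simp only [he, h1, h2, Bool.false_eq_true, if_false]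
    exact pv_chain₂ _ _
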